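-- pv_equiv track=rewrite | github.com/jupyter-naas/abi | src/core/modules/ontology/tests/format_domain_ranges.py | get_first_rest
-- ===== SOURCE A (Python) =====
-- def get_first_rest(tpl):
--     first = None
--     rest = None
--     for i in tpl:
--         a, b = i
--
--         if str(a) == "http://www.w3.org/1999/02/22-rdf-syntax-ns#first":
--             first = str(b)
--
--         if (
--             str(a) == "http://www.w3.org/1999/02/22-rdf-syntax-ns#rest"
--             and str(b) != "http://www.w3.org/1999/02/22-rdf-syntax-ns#nil"
--         ):
--             rest = str(b)
--     return first, rest
-- ===== SOURCE B (Python) =====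
-- RDF = "http://www.w3.org/1999/02/22-rdf-syntax-ns#"
--
-- def get_first_rest(tpl):
--     pairs = list(tpl)
--     first = None
--     rest = None
--     i = len(pairs) - 1
--     while i >= 0 and (first is None or rest is None):
--         a, b = pairs[i]
--         if first is None and str(a) == RDF + "first":
--             first = str(b)
--         if rest is None and str(a) == RDF + "rest" and str(b) != RDF + "nil":
--             rest = str(b)
--         i -= 1
--     return first, rest
-- ===== Notes on version B (the rewrite author's own statement) =====
-- stated objective: alternative
-- what changed: Replaces A's full forward scan that keeps overwriting two accumulators with a backward scan that keeps the first (i.e. last-in-input) match for each slot and stops early once both slots are filled.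
import Mathlib
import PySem

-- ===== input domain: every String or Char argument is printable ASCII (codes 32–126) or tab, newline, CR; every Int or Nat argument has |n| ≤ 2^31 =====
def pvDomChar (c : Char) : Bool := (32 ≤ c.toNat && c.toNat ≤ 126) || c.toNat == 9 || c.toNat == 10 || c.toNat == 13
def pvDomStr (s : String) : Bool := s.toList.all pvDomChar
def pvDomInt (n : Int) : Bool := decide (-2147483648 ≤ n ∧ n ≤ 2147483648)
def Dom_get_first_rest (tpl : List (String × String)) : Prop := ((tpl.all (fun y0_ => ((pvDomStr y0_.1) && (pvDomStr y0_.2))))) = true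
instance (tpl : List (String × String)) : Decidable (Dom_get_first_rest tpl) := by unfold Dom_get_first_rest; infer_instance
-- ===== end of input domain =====

-- B replaces A's forward scan with overwritten accumulators by a backward scan
-- that keeps the first match found for each slot and stops once both are filled
-- (alternative decomposition, same cost). Return value only; nothing is mutated.

-- ===== PORT A =====
-- forward loop over tpl, overwriting `first`/`rest` state on every match
def get_first_rest (tpl : List (String × String)) : Option String × Option String :=
  tpl.foldl
    (fun st p =>
      (if p.1 == "http://www.w3.org/1999/02/22-rdf-syntax-ns#first" then some p.2 else st.1,
       if p.1 == "http://www.w3.org/1999/02/22-rdf-syntax-ns#rest"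
            && p.2 != "http://www.w3.org/1999/02/22-rdf-syntax-ns#nil" then some p.2 else st.2))
    (none, none)

-- ===== PORT B =====
-- backward while-loop (structural recursion over the reversed list) with
-- early exit as soon as both slots are filled; a slot, once filled, is kept
def grBack : List (String × String) → Option String → Option String →
    Option String × Option String
  | [], first, rest => (first, rest)
  | p :: ps, first, rest =>
    if first.isSome && rest.isSome then (first, rest)
    else
      grBack ps
        (if first.isNone && (p.1 == "http://www.w3.org/1999/02/22-rdf-syntax-ns#first")
         then some p.2 else first)
        (if rest.isNone && (p.1 == "http://www.w3.org/1999/02/22-rdf-syntax-ns#rest"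
              && p.2 != "http://www.w3.org/1999/02/22-rdf-syntax-ns#nil")
         then some p.2 else rest)

def get_first_rest_alt (tpl : List (String × String)) : Option String × Option String :=
  grBack tpl.reverse none none

-- ===== PRECONDITION & SPEC =====
def Spec_get_first_rest (tpl : List (String × String)) (out : Option String × Option String) : Prop := out = get_first_rest_alt tpl
instance (tpl : List (String × String)) (out : Option String × Option String) : Decidable (Spec_get_first_rest tpl out) := by unfold Spec_get_first_rest; infer_instance

-- ===== CLAIM =====
def Claim_equal_get_first_rest : Prop := ∀ (tpl : List (String × String)), Dom_get_first_rest tpl → Spec_get_first_rest tpl (get_first_rest tpl)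

-- ===== LEMMAS AND PROOFS =====

-- the backward keep-first scan equals the last-match search on its list,
-- with the incoming slots taking precedence
theorem grBack_eq (l : List (String × String)) (f0 r0 : Option String) :
    grBack l f0 r0
    = (f0.or ((l.find? (fun p => p.1 == "http://www.w3.org/1999/02/22-rdf-syntax-ns#first")).map Prod.snd),
       r0.or ((l.find? (fun p => p.1 == "http://www.w3.org/1999/02/22-rdf-syntax-ns#rest"
           && p.2 != "http://www.w3.org/1999/02/22-rdf-syntax-ns#nil")).map Prod.snd)) := by
  induction l generalizing f0 r0 with
  | nil => simp [grBack]
  | cons x xs ih =>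
    cases f0 <;> cases r0 <;>
      simp only [grBack, Option.isSome, Option.isNone, Bool.and_self, Bool.true_and,
        Bool.false_and, Bool.and_true, Bool.and_false, if_true, if_false, ih, List.find?] <;>
      cases h1 : (x.1 == "http://www.w3.org/1999/02/22-rdf-syntax-ns#first") <;>
      cases h2 : (x.1 == "http://www.w3.org/1999/02/22-rdf-syntax-ns#rest"
          && x.2 != "http://www.w3.org/1999/02/22-rdf-syntax-ns#nil") <;>
      simp [h1, h2]

-- the forward overwrite fold equals the last-match search on the reversed list
theorem get_first_rest_fold_eq (tpl : List (String × String)) (f0 r0 : Option String) :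
    tpl.foldl
      (fun st p =>
        (if p.1 == "http://www.w3.org/1999/02/22-rdf-syntax-ns#first" then some p.2 else st.1,
         if p.1 == "http://www.w3.org/1999/02/22-rdf-syntax-ns#rest"
              && p.2 != "http://www.w3.org/1999/02/22-rdf-syntax-ns#nil" then some p.2 else st.2))
      (f0, r0)
    = (((tpl.reverse.find? (fun p => p.1 == "http://www.w3.org/1999/02/22-rdf-syntax-ns#first")).map Prod.snd).or f0,
       ((tpl.reverse.find? (fun p => p.1 == "http://www.w3.org/1999/02/22-rdf-syntax-ns#rest"
           && p.2 != "http://www.w3.org/1999/02/22-rdf-syntax-ns#nil")).map Prod.snd).or r0) := by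
  induction tpl generalizing f0 r0 with
  | nil => simp
  | cons x xs ih =>
    simp only [List.foldl_cons, List.reverse_cons, List.find?_append, ih]
    cases h1 : (x.1 == "http://www.w3.org/1999/02/22-rdf-syntax-ns#first") <;>
      cases h2 : (x.1 == "http://www.w3.org/1999/02/22-rdf-syntax-ns#rest"
          && x.2 != "http://www.w3.org/1999/02/22-rdf-syntax-ns#nil") <;>
      simp [List.find?, h1, h2]

-- ===== VERDICT =====
theorem get_first_rest_spec : Claim_equal_get_first_rest := by
  intro tpl _
  unfold Spec_get_first_rest get_first_rest get_first_rest_alt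
  rw [get_first_rest_fold_eq, grBack_eq]
  simp
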